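-- pv_equiv track=rewrite | github.com/mrveiss/AutoBot-AI | src/conversation.py | _needs_external_research
-- ===== SOURCE A (Python) =====
-- from typing import Any, Dict, List, Optional
--
-- def _needs_external_research(
--     user_message: str, kb_results: List[Dict[str, Any]]
-- ) -> bool:
--     """Determine if external research is needed"""
--     # Check if KB results are insufficient
--     if not kb_results or len(kb_results) < 2:
--         # Check for research keywords
--         research_keywords = [
--             "latest",
--             "current",
--             "recent",
--             "new",
--             "today",
--             "2024",
--             "2025",
--             "what's happening",
--             "news",
--             "trends",
--             "update",
--             "status",
--             "compare",
--             "vs",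
--             "versus",
--             "difference between",
--             "how to",
--             "tutorial",
--             "guide",
--             "step by step",
--             "price",
--             "cost",
--             "buy",
--             "purchase",
--             "review",
--         ]
--
--         user_lower = user_message.lower()
--         return any(keyword in user_lower for keyword in research_keywords)
--
--     return False
-- ===== SOURCE B (Python) =====
-- from typing import Any, Dict, List
--
-- _KW = [
--     "latest", "current", "recent", "new", "today", "2024", "2025",
--     "what's happening", "news", "trends", "update", "status", "compare",
--     "vs", "versus", "difference between", "how to", "tutorial", "guide",
--     "step by step", "price", "cost", "buy", "purchase", "review",
-- ]
-- _KW_SET = set(_KW)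
-- _LENS = sorted({len(k) for k in _KW})
--
-- def _needs_external_research(
--     user_message: str, kb_results: List[Dict[str, Any]]
-- ) -> bool:
--     """Determine if external research is needed"""
--     if not kb_results or len(kb_results) < 2:
--         s = user_message.lower()
--         n = len(s)
--         # sliding-window + hash-set: for each distinct keyword length L,
--         # test every window s[i:i+L] for membership in the keyword set,
--         # instead of running a separate substring search per keyword
--         return any(
--             s[i:i + L] in _KW_SET
--             for L in _LENS
--             for i in range(n - L + 1)
--         )
--     return False
-- ===== Notes on version B (the rewrite author's own statement) =====
-- stated objective: alternative
-- what changed: Replaces the per-keyword substring searches (any(k in lowered_message)) by a sliding-window algorithm: for each distinct keyword length L it tests every window s[i:i+L] for membership in a precomputed hash set of the keywords.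
import Mathlib
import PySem

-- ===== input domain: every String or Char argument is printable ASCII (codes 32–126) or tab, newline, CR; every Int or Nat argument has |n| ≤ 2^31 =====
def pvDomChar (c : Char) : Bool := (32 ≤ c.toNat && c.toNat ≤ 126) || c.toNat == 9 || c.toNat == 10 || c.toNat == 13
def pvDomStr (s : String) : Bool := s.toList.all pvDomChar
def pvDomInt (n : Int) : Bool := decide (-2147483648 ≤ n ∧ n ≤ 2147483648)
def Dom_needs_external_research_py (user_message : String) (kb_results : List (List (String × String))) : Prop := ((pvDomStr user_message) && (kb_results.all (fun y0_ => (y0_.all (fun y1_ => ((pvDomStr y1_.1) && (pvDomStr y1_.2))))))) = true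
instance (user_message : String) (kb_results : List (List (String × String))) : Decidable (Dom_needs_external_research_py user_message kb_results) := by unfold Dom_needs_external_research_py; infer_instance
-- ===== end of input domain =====

-- B replaces the per-keyword substring searches by a sliding-window scan with
-- set membership of the windows (objective: alternative).

-- ===== PORT A =====
-- A's research_keywords list (helper of A)
def kwA : List String :=
  ["latest", "current", "recent", "new", "today", "2024", "2025",
   "what's happening", "news", "trends", "update", "status", "compare",
   "vs", "versus", "difference between", "how to", "tutorial", "guide",
   "step by step", "price", "cost", "buy", "purchase", "review"]

-- literal port of A: guard, lower the message, any(keyword in user_lower)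
def needs_external_research_py (user_message : String) (kb_results : List (List (String × String))) : Bool :=
  if kb_results.isEmpty || kb_results.length < 2 then
    let user_lower := PySem.Str.lower user_message
    kwA.any (fun keyword => PySem.Str.isIn keyword user_lower)
  else
    false

-- ===== PORT B =====
-- B's module-level keyword list (as character lists: B slices the message character-wise)
def kwB : List (List Char) :=
  ["latest".toList, "current".toList, "recent".toList, "new".toList, "today".toList,
   "2024".toList, "2025".toList, "what's happening".toList, "news".toList, "trends".toList,
   "update".toList, "status".toList, "compare".toList, "vs".toList, "versus".toList,
   "difference between".toList, "how to".toList, "tutorial".toList, "guide".toList,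
   "step by step".toList, "price".toList, "cost".toList, "buy".toList, "purchase".toList,
   "review".toList]

-- _KW_SET = set(_KW)
def kwSetB : PySem.Set (List Char) := PySem.Set.ofList kwB

-- _LENS = sorted({len(k) for k in _KW})
def lensB : List Int :=
  PySem.List.sorted (PySem.Set.ofList (kwB.map (fun k => (k.length : Int)))) (fun x => x) false

-- port of B: guard, lower, then any window s[i:i+L] in the keyword set
def needs_external_research_py_alt (user_message : String) (kb_results : List (List (String × String))) : Bool :=
  if kb_results.isEmpty || kb_results.length < 2 then
    let s := PySem.Chars.lower user_message.toList
    let n : Int := s.length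
    lensB.any (fun L =>
      (PySem.List.pyRange 0 (n - L + 1) 1).any (fun i =>
        PySem.Set.contains kwSetB (PySem.List.slice s (some i) (some (i + L)))))
  else
    false

-- ===== PRECONDITION & SPEC =====
def Spec_needs_external_research_py (user_message : String) (kb_results : List (List (String × String))) (out : Bool) : Prop := out = needs_external_research_py_alt user_message kb_results
instance (user_message : String) (kb_results : List (List (String × String))) (out : Bool) : Decidable (Spec_needs_external_research_py user_message kb_results out) := by unfold Spec_needs_external_research_py; infer_instance

-- ===== CLAIM (what is proved, stated in full; the proofs are below) =====
def Claim_equal_needs_external_research_py : Prop := ∀ (user_message : String) (kb_results : List (List (String × String))), Dom_needs_external_research_py user_message kb_results → Spec_needs_external_research_py user_message kb_results (needs_external_research_py user_message kb_results)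

-- ===== LEMMAS AND PROOFS =====

-- closed facts linking the two keyword tables (evaluated by decide)
theorem lensB_pos : ∀ L ∈ lensB, 0 < L := by decide

theorem kwA_len_mem_lensB : ∀ kw ∈ kwA, ((kw.toList.length : Int)) ∈ lensB := by decide

theorem kwA_toList_mem_kwB : ∀ kw ∈ kwA, kw.toList ∈ kwB := by decide

theorem kwB_mem_kwA : ∀ w ∈ kwB, ∃ kw ∈ kwA, kw.toList = w := by decide

-- B's window scan finds exactly the keywords that occur as substrings of s
theorem windows_eq_isIn (s : List Char) :
    (lensB.any (fun L =>
      (PySem.List.pyRange 0 ((s.length : Int) - L + 1) 1).any (fun i =>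
        PySem.Set.contains kwSetB (PySem.List.slice s (some i) (some (i + L))))))
    = kwA.any (fun kw => PySem.Chars.isIn kw.toList s) := by
  rw [Bool.eq_iff_iff]
  simp only [List.any_eq_true, PySem.List.mem_pyRange_one, PySem.Chars.isIn_iff_infix,
    PySem.Set.contains_iff, kwSetB, PySem.Set.mem_ofList]
  constructor
  · rintro ⟨L, hL, i, ⟨h0, hlt⟩, hmem⟩
    have hLpos := lensB_pos _ hL
    obtain ⟨kw, hkw, hk⟩ := kwB_mem_kwA _ hmem
    refine ⟨kw, hkw, ?_⟩
    rw [hk]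
    calc PySem.List.slice s (some i) (some (i + L))
        = (s.drop i.toNat).take ((i + L).toNat - i.toNat) :=
          PySem.List.slice_toNat (xs := s) (a := i) (b := i + L) h0 (by omega)
      _ <:+: s := ((List.take_prefix _ _).isInfix).trans (List.drop_suffix _ _).isInfix
  · rintro ⟨kw, hkw, pre, suf, hsplit⟩
    refine ⟨(kw.toList.length : Int), kwA_len_mem_lensB _ hkw,
            (pre.length : Int), ⟨by positivity, ?_⟩, ?_⟩
    · have : pre.length + kw.toList.length ≤ s.length := by
        rw [← hsplit]; simp
      omega
    · have hsl : PySem.List.slice s (some (pre.length : Int))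
          (some ((pre.length : Int) + (kw.toList.length : Int))) = kw.toList := by
        rw [PySem.List.slice_natCast_add, ← hsplit, List.append_assoc,
          List.drop_left, List.take_left]
      rw [hsl]
      exact kwA_toList_mem_kwB _ hkw

-- ===== VERDICT (by name: the statement is the Claim_ definition above) =====
theorem needs_external_research_py_spec : Claim_equal_needs_external_research_py := by
  intro user_message kb_results _
  unfold Spec_needs_external_research_py needs_external_research_py needs_external_research_py_alt
  split
  · rw [windows_eq_isIn]
    simp only [PySem.Str.isIn_eq, PySem.Str.toList_lower]
  · rfl
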